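-- pv_equiv track=rewrite | github.com/adnaniazi/capfinder | src/capfinder/align.py | make_alignment_chunks
-- ===== SOURCE A (Python) =====
-- def make_alignment_chunks(
--     target: str, query: str, alignment: str, chunk_size: int
-- ) -> str:
--     """
--     Divide three strings (target, query, and alignment) into chunks of the specified length
--     and print them as triplets with the specified prefixes and a one-line gap between each triplet.
--
--     Args:
--         target (str): The target/reference string.
--         query (str): The query string.
--         alignment (str): The alignment string.
--         chunk_size (int): The desired chunk size.
--
--     Returns:
--         aln_string (str): The aligned strings in chunks with the specified prefix.
--     """
--     # Check if chunk size is valid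
--     if chunk_size <= 0:
--         raise ValueError("Chunk size must be greater than zero")
--
--     # Divide the strings into chunks
--     target_chunks = [
--         target[i : i + chunk_size] for i in range(0, len(target), chunk_size)
--     ]
--     query_chunks = [query[i : i + chunk_size] for i in range(0, len(query), chunk_size)]
--     alignment_chunks = [
--         alignment[i : i + chunk_size] for i in range(0, len(alignment), chunk_size)
--     ]
--
--     # Iterate over the triplets and print them
--     aln_string = ""
--     for t_chunk, q_chunk, a_chunk in zip(target_chunks, query_chunks, alignment_chunks):
--         aln_string += f"QRY: {q_chunk}\n"
--         aln_string += f"ALN: {a_chunk}\n"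
--         aln_string += f"REF: {t_chunk}\n\n"
--
--     return aln_string
-- ===== SOURCE B (Python) =====
-- def make_alignment_chunks(
--     target: str, query: str, alignment: str, chunk_size: int
-- ) -> str:
--     """Format aligned triplet blocks by consuming the three strings.
--
--     Instead of precomputing three chunk lists and zipping them, repeatedly
--     peel the first chunk_size characters off each string while all three
--     are non-empty (zip stops at the shortest input), collecting the
--     formatted lines and joining them at the end.
--     """
--     if chunk_size <= 0:
--         raise ValueError("Chunk size must be greater than zero")
--     parts = []
--     while target and query and alignment:
--         parts.append(f"QRY: {query[:chunk_size]}\n")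
--         parts.append(f"ALN: {alignment[:chunk_size]}\n")
--         parts.append(f"REF: {target[:chunk_size]}\n\n")
--         target = target[chunk_size:]
--         query = query[chunk_size:]
--         alignment = alignment[chunk_size:]
--     return "".join(parts)
-- ===== Notes on version B (the rewrite author's own statement) =====
-- stated objective: alternative
-- what changed: Replaced the three precomputed chunk lists plus zip plus string += accumulation by a destructive while-loop that peels the leading chunk off each of the three strings until one is exhausted, collecting the lines in a list joined at the end.
import Mathlib
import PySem

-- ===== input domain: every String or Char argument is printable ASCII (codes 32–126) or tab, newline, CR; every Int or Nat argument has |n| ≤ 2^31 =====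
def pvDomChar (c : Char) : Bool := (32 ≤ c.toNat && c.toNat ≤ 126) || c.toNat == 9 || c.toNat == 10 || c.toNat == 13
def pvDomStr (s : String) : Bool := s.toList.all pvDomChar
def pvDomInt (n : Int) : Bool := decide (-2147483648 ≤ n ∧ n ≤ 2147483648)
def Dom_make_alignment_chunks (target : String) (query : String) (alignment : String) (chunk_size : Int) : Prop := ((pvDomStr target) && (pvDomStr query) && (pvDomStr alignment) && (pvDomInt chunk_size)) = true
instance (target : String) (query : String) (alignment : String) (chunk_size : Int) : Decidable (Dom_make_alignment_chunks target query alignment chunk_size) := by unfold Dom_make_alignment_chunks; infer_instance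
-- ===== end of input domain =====

-- B replaces A's three precomputed chunk lists + zip + `+=` accumulation by a consuming loop
-- that peels the leading chunk off each string until one is exhausted, joining the collected lines (objective: alternative).

-- ===== PORT A =====
def make_alignment_chunks (target : String) (query : String) (alignment : String) (chunk_size : Int) : String :=
  -- chunk_size <= 0 raises ValueError: excluded by Pre_make_alignment_chunks
  let t := target.toList
  let q := query.toList
  let a := alignment.toList
  let target_chunks := (PySem.List.pyRange 0 (t.length : Int) chunk_size).map
      (fun i => PySem.List.slice t (some i) (some (i + chunk_size)))
  let query_chunks := (PySem.List.pyRange 0 (q.length : Int) chunk_size).map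
      (fun i => PySem.List.slice q (some i) (some (i + chunk_size)))
  let alignment_chunks := (PySem.List.pyRange 0 (a.length : Int) chunk_size).map
      (fun i => PySem.List.slice a (some i) (some (i + chunk_size)))
  -- for t_chunk, q_chunk, a_chunk in zip(...): aln_string += three f-string lines
  let aln_string := (target_chunks.zip (query_chunks.zip alignment_chunks)).foldl
      (fun acc tqa =>
        acc ++ ("QRY: ".toList ++ tqa.2.1 ++ ['\n'])
            ++ ("ALN: ".toList ++ tqa.2.2 ++ ['\n'])
            ++ ("REF: ".toList ++ tqa.1 ++ ['\n', '\n'])) []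
  String.ofList aln_string

-- ===== PORT B =====
-- the while-loop of Source B: while target and query and alignment, append three lines to parts
-- and peel chunk_size off each string; fuel bounds the iteration count (≤ len target when chunk_size ≥ 1)
def pvAltLoop (fuel : Nat) (c : Int) (t q a : List Char) (parts : List (List Char)) : List (List Char) :=
  match fuel with
  | 0 => parts
  | Nat.succ f =>
    if t = [] ∨ q = [] ∨ a = [] then parts
    else
      pvAltLoop f c (PySem.List.slice t (some c) none) (PySem.List.slice q (some c) none)
        (PySem.List.slice a (some c) none)
        (parts ++ [ "QRY: ".toList ++ PySem.List.slice q none (some c) ++ ['\n'],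
                    "ALN: ".toList ++ PySem.List.slice a none (some c) ++ ['\n'],
                    "REF: ".toList ++ PySem.List.slice t none (some c) ++ ['\n', '\n'] ])

def make_alignment_chunks_alt (target : String) (query : String) (alignment : String) (chunk_size : Int) : String :=
  -- chunk_size <= 0 raises ValueError: excluded by Pre_make_alignment_chunks
  let parts := pvAltLoop (target.toList.length + 1) chunk_size
      target.toList query.toList alignment.toList []
  -- "".join(parts)
  String.ofList parts.flatten

-- ===== PRECONDITION & SPEC =====
-- Python A raises ValueError exactly when chunk_size <= 0.
def Pre_make_alignment_chunks (target : String) (query : String) (alignment : String) (chunk_size : Int) : Prop := 0 < chunk_size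
instance (target : String) (query : String) (alignment : String) (chunk_size : Int) : Decidable (Pre_make_alignment_chunks target query alignment chunk_size) := by unfold Pre_make_alignment_chunks; infer_instance
def pvWitness_make_alignment_chunks : String × String × String × Int := ("ACGT", "ACGA", "||.|", 2)

def Spec_make_alignment_chunks (target : String) (query : String) (alignment : String) (chunk_size : Int) (out : String) : Prop := out = make_alignment_chunks_alt target query alignment chunk_size
instance (target : String) (query : String) (alignment : String) (chunk_size : Int) (out : String) : Decidable (Spec_make_alignment_chunks target query alignment chunk_size out) := by unfold Spec_make_alignment_chunks; infer_instance

-- ===== CLAIM (what is proved, stated in full; the proofs are below) =====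
def Claim_equal_make_alignment_chunks : Prop := ∀ (target : String) (query : String) (alignment : String) (chunk_size : Int), Dom_make_alignment_chunks target query alignment chunk_size → Pre_make_alignment_chunks target query alignment chunk_size → Spec_make_alignment_chunks target query alignment chunk_size (make_alignment_chunks target query alignment chunk_size)

-- ===== LEMMAS AND PROOFS =====

-- the k-th block, expressed over drop/take (common normal form of both sides)
def pvBlock (c : Nat) (t q a : List Char) (k : Nat) : List (List Char) :=
  [ "QRY: ".toList ++ ((q.drop (c * k)).take c) ++ ['\n'],
    "ALN: ".toList ++ ((a.drop (c * k)).take c) ++ ['\n'],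
    "REF: ".toList ++ ((t.drop (c * k)).take c) ++ ['\n', '\n'] ]

-- zip of two maps over ranges stops at the shorter range
lemma pvZipMapRange {α β : Type} (f : Nat → α) (g : Nat → β) (a b : Nat) :
    ((List.range a).map f).zip ((List.range b).map g)
      = (List.range (min a b)).map (fun k => (f k, g k)) := by
  apply List.ext_getElem
  · simp
  · intro i h1 h2
    simp [List.getElem_zip]

-- ceiling division by a positive constant commutes with min
lemma pvCeilDivMin (c x y : Nat) :
    min ((x + c - 1) / c) ((y + c - 1) / c) = (min x y + c - 1) / c := by
  rcases le_total x y with h | h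
  · rw [min_eq_left h, min_eq_left (Nat.div_le_div_right (by omega))]
  · rw [min_eq_right h, min_eq_right (Nat.div_le_div_right (by omega))]

-- pyRange 0 len c with positive step c, len a Nat: a map over a plain range of the chunk count
lemma pvRangeN (len c : Nat) (hc : 0 < c) :
    PySem.List.pyRange 0 (len : Int) (c : Int)
      = (List.range ((len + c - 1) / c)).map (fun k => ((c * k : Nat) : Int)) := by
  rw [PySem.List.pyRange_of_pos _ _ (by exact_mod_cast hc)]
  have hcount : (if (0:Int) < (len:Int) then (((len:Int) - 0 + c - 1) / c).toNat else 0)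
      = (len + c - 1) / c := by
    rcases Nat.eq_zero_or_pos len with h0 | hpos
    · subst h0
      simp [Nat.div_eq_of_lt (by omega : c - 1 < c)]
    · rw [if_pos (by exact_mod_cast hpos)]
      have : ((len:Int) - 0 + c - 1) = (((len + c - 1 : Nat)) : Int) := by omega
      rw [this, ← Int.natCast_div, Int.toNat_natCast]
  rw [hcount]
  refine List.map_congr_left (fun k _ => ?_)
  simp

-- one ceiling step: for m ≥ 1, ceil(m/c) = 1 + ceil((m-c)/c)
lemma pvCeilStep (c m : Nat) (hc : 0 < c) (hm : 0 < m) :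
    (m + c - 1) / c = ((m - c) + c - 1) / c + 1 := by
  rcases le_total c m with h | h
  · have : m + c - 1 = ((m - c) + c - 1) + c := by omega
    rw [this, Nat.add_div_right _ hc]
  · have h1 : m + c - 1 < 2 * c := by omega
    have h2 : c ≤ m + c - 1 := by omega
    rw [Nat.sub_eq_zero_of_le h, Nat.zero_add,
        Nat.div_eq_of_lt (by omega : c - 1 < c)]
    exact Nat.div_eq_of_lt_le (by omega) (by omega)

-- B's loop computes the blocks at offsets 0, c, 2c, … up to the min length
lemma pvLoop_eq (c : Nat) (hc : 0 < c) :
    ∀ (fuel : Nat) (t q a : List Char) (parts : List (List Char)), t.length ≤ fuel →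
    pvAltLoop fuel (c : Int) t q a parts
      = parts ++ ((List.range ((min (min t.length q.length) a.length + c - 1) / c)).map
          (pvBlock c t q a)).flatten := by
  intro fuel
  induction fuel with
  | zero =>
    intro t q a parts h
    have ht : t = [] := List.eq_nil_of_length_eq_zero (by omega)
    subst ht
    simp [pvAltLoop, Nat.div_eq_of_lt (by omega : c - 1 < c)]
  | succ f ih =>
    intro t q a parts h
    by_cases hstop : t = [] ∨ q = [] ∨ a = []
    · have hmin : min (min t.length q.length) a.length = 0 := by
        rcases hstop with h1 | h1 | h1 <;> simp [h1]
      rw [pvAltLoop, if_pos hstop, hmin]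
      simp [Nat.div_eq_of_lt (by omega : c - 1 < c)]
    · rw [not_or, not_or] at hstop
      obtain ⟨ht, hq, ha⟩ := hstop
      have htl : 0 < t.length := List.length_pos_of_ne_nil ht
      have hql : 0 < q.length := List.length_pos_of_ne_nil hq
      have hal : 0 < a.length := List.length_pos_of_ne_nil ha
      rw [pvAltLoop, if_neg (by simp [ht, hq, ha])]
      rw [PySem.List.slice_from_natCast, PySem.List.slice_from_natCast,
          PySem.List.slice_from_natCast, PySem.List.slice_to_natCast,
          PySem.List.slice_to_natCast, PySem.List.slice_to_natCast]
      rw [ih (t.drop c) (q.drop c) (a.drop c) _ (by simp; omega)]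
      have hmin : 0 < min (min t.length q.length) a.length := by
        simp [htl, hql, hal]
      rw [List.length_drop, List.length_drop, List.length_drop]
      have hminsub : min (min (t.length - c) (q.length - c)) (a.length - c)
          = min (min t.length q.length) a.length - c := by omega
      rw [hminsub, pvCeilStep c _ hc hmin,
          List.range_succ_eq_map, List.map_cons, List.flatten_cons, List.map_map]
      have hblock : ∀ k, (pvBlock c t q a ∘ Nat.succ) k
          = pvBlock c (t.drop c) (q.drop c) (a.drop c) k := by
        intro k
        simp [pvBlock, Function.comp, List.drop_drop, Nat.mul_succ, Nat.add_comm]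
      rw [List.map_congr_left (fun k _ => hblock k)]
      simp [pvBlock, List.append_assoc]

-- A = B, pointwise
theorem make_alignment_chunks_spec_aux (target query alignment : String) (chunk_size : Int)
    (hpre : 0 < chunk_size) :
    make_alignment_chunks target query alignment chunk_size
      = make_alignment_chunks_alt target query alignment chunk_size := by
  unfold make_alignment_chunks make_alignment_chunks_alt
  dsimp only
  set c : Nat := chunk_size.toNat with hc
  have hcs : chunk_size = (c : Int) := by omega
  have hcpos : 0 < c := by omega
  set t := target.toList
  set q := query.toList
  set a := alignment.toList
  rw [hcs, pvRangeN t.length c hcpos, pvRangeN q.length c hcpos, pvRangeN a.length c hcpos,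
    pvLoop_eq c hcpos (t.length + 1) t q a [] (by omega)]
  simp only [List.map_map, Function.comp_def]
  rw [pvZipMapRange, pvZipMapRange]
  rw [min_assoc, pvCeilDivMin, pvCeilDivMin, ← min_assoc]
  simp only [List.append_assoc]
  rw [PySem.List.foldl_append_eq_flatMap]
  rw [← List.flatMap_def, List.flatMap_map]
  simp only [List.flatMap_def]
  have hjoin : ∀ (l : List ℕ) (f : ℕ → List (List Char)),
      ((l.map f).flatten).flatten = (l.map (fun k => (f k).flatten)).flatten := by
    intro l f
    induction l with
    | nil => simp
    | cons x xs ih => simp [ih]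
  simp only [List.nil_append]
  rw [hjoin]
  refine congrArg String.ofList (congrArg List.flatten (List.map_congr_left fun k _ => ?_))
  rw [PySem.List.slice_natCast_add, PySem.List.slice_natCast_add, PySem.List.slice_natCast_add]
  simp [pvBlock]

-- ===== VERDICT (by name: the statement is the Claim_ definition above) =====
theorem make_alignment_chunks_spec : Claim_equal_make_alignment_chunks := by
  intro target query alignment chunk_size _ hpre
  exact make_alignment_chunks_spec_aux target query alignment chunk_size hpre
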